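-- pv_equiv track=rewrite | github.com/spenceacned911/LabNote | labnote/core/toc.py | _find_heading_lines
-- ===== SOURCE A (Python) =====
-- from typing import Iterable
--
-- def _find_heading_lines(source_text: str, heading_texts: Iterable[str]) -> list[int]:
--     lines = source_text.splitlines()
--     results: list[int] = []
--     start_index = 0
--     for heading in heading_texts:
--         normalized_heading = " ".join(heading.split()).strip()
--         found = False
--         for idx in range(start_index, len(lines)):
--             candidate = lines[idx].strip()
--             stripped = candidate.lstrip("#").strip() if candidate.startswith("#") else candidate
--             if normalized_heading and normalized_heading == " ".join(stripped.split()).strip():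
--                 results.append(idx + 1)
--                 start_index = idx + 1
--                 found = True
--                 break
--         if not found:
--             results.append(1)
--     return results
-- ===== SOURCE B (Python) =====
-- def _find_heading_lines(source_text, heading_texts):
--     # One pass builds a map from normalized line text to the ascending list of
--     # line indices; each heading is then resolved by a binary search for the
--     # first occurrence at or after the running start index.
--     def _norm_line(line):
--         t = line.strip()
--         if t.startswith("#"):
--             t = t.lstrip("#").strip()
--         return " ".join(t.split()).strip()
--
--     def _bisect_left(a, x):
--         lo, hi = 0, len(a)
--         while lo < hi:
--             mid = (lo + hi) // 2
--             if a[mid] < x: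
--                 lo = mid + 1
--             else:
--                 hi = mid
--         return lo
--
--     index = {}
--     for i, line in enumerate(source_text.splitlines()):
--         index.setdefault(_norm_line(line), []).append(i)
--
--     results = []
--     start = 0
--     for heading in heading_texts:
--         nh = " ".join(heading.split()).strip()
--         occ = index.get(nh, []) if nh else []
--         j = _bisect_left(occ, start)
--         if j < len(occ):
--             idx = occ[j]
--             results.append(idx + 1)
--             start = idx + 1
--         else:
--             results.append(1)
--     return results
-- ===== Notes on version B (the rewrite author's own statement) =====
-- stated objective: faster
-- what changed: Replaces the per-heading rescans (each heading re-normalizes and linearly scans the lines from start_index) with a single pass that indexes normalized lines into a dict of ascending index lists, resolving each heading by a binary search for the first index >= start.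
import Mathlib
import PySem

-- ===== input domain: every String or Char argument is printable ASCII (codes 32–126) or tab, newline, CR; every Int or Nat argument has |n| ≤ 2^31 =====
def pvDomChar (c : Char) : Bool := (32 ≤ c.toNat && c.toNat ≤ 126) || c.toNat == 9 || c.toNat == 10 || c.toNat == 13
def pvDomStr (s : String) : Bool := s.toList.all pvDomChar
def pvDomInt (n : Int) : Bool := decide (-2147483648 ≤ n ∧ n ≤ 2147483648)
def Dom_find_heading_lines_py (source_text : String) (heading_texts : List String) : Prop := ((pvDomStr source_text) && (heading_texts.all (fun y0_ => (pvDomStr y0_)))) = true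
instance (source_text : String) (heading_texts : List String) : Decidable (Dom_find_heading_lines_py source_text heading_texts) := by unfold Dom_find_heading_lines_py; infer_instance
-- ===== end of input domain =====

-- B replaces A's per-heading linear rescans with a one-pass index of normalized
-- lines (dict of ascending index lists) plus a binary search per heading (objective: faster).

-- ===== PORT A =====
-- candidate.lstrip("#") ported by hand as dropWhile (exact: single-char strip set).
def pvStrippedA (line : String) : String :=
  let candidate := PySem.Str.strip line
  if PySem.Str.startswith candidate "#" then
    PySem.Str.strip (String.mk (candidate.toList.dropWhile (· == '#')))
  else candidate

-- " ".join(s.split()).strip()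
def pvNormWSA (s : String) : String :=
  PySem.Str.strip (PySem.Str.join " " (PySem.Str.split₀ s))

-- the inner 'for idx in range(start_index, len(lines)): … break' loop
def pvInnerA (lines : List String) (nh : String) (idx : Nat) : Option Nat :=
  if h : idx < lines.length then
    let stripped := pvStrippedA lines[idx]
    if nh ≠ "" ∧ nh = pvNormWSA stripped then some idx
    else pvInnerA lines nh (idx + 1)
  else none
termination_by lines.length - idx

def find_heading_lines_py (source_text : String) (heading_texts : List String) : List Int :=
  let lines := PySem.Str.splitlines source_text
  (heading_texts.foldl (fun (st : List Int × Nat) heading =>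
      let nh := pvNormWSA heading
      match pvInnerA lines nh st.2 with
      | some idx => (st.1 ++ [((idx : Int) + 1)], idx + 1)
      | none => (st.1 ++ [(1 : Int)], st.2))
    ([], 0)).1

-- ===== PORT B =====
def pvNormLineB (line : String) : String :=
  let t := PySem.Str.strip line
  let t := if PySem.Str.startswith t "#" then
    PySem.Str.strip (String.mk (t.toList.dropWhile (· == '#')))
  else t
  PySem.Str.strip (PySem.Str.join " " (PySem.Str.split₀ t))

-- hand-written bisect_left from Source B; a[mid] is always in range here (lo < hi ≤ len a)
def pvBisectB (a : List Int) (x : Int) (lo hi : Nat) : Nat :=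
  if lo < hi then
    let mid := (lo + hi) / 2
    if a.getD mid 0 < x then pvBisectB a x (mid + 1) hi
    else pvBisectB a x lo mid
  else lo
termination_by hi - lo
decreasing_by all_goals omega

-- one pass: index[norm(line)] = ascending list of indices (setdefault+append = modify _ [] (· ++ [i]))
def pvIndexB (lines : List String) : PySem.Dict String (List Int) :=
  ((PySem.List.enumerate lines).map (fun p => (pvNormLineB p.2, p.1))).foldl
    (fun d p => d.modify p.1 ([] : List Int) (fun l => l ++ [p.2])) PySem.Dict.empty

def find_heading_lines_py_alt (source_text : String) (heading_texts : List String) : List Int :=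
  let index := pvIndexB (PySem.Str.splitlines source_text)
  (heading_texts.foldl (fun (st : List Int × Int) heading =>
      let nh := PySem.Str.strip (PySem.Str.join " " (PySem.Str.split₀ heading))
      let occ := if nh ≠ "" then index.getD nh [] else []
      let j := pvBisectB occ st.2 0 occ.length
      if hj : j < occ.length then
        let idx := occ[j]
        (st.1 ++ [idx + 1], idx + 1)
      else (st.1 ++ [(1 : Int)], st.2))
    ([], 0)).1

-- ===== PRECONDITION & SPEC =====
def Spec_find_heading_lines_py (source_text : String) (heading_texts : List String) (out : List Int) : Prop := out = find_heading_lines_py_alt source_text heading_texts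
instance (source_text : String) (heading_texts : List String) (out : List Int) : Decidable (Spec_find_heading_lines_py source_text heading_texts out) := by unfold Spec_find_heading_lines_py; infer_instance

-- ===== CLAIM (what is proved, stated in full; the proofs are below) =====
def Claim_equal_find_heading_lines_py : Prop := ∀ (source_text : String) (heading_texts : List String), Dom_find_heading_lines_py source_text heading_texts → Spec_find_heading_lines_py source_text heading_texts (find_heading_lines_py source_text heading_texts)

-- ===== LEMMAS AND PROOFS =====

-- B's per-line normalization is A's (same Python expressions)
theorem pvNorm_eq (line : String) : pvNormLineB line = pvNormWSA (pvStrippedA line) := rfl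

-- the occurrence list looked up for a heading
def pvOcc (lines : List String) (nh : String) : List Int :=
  if nh ≠ "" then (pvIndexB lines).getD nh [] else []

theorem pvOcc_eq_filter (lines : List String) (nh : String) (hnh : nh ≠ "") :
    pvOcc lines nh
      = ((PySem.List.enumerate lines).filter (fun p => pvNormLineB p.2 == nh)).map (fun p => p.1) := by
  simp only [pvOcc, if_pos hnh, pvIndexB]
  rw [PySem.Dict.getD_foldl_modify_append]
  simp [List.filter_map, Function.comp_def]

theorem pvOcc_pairwise (lines : List String) (nh : String) :
    (pvOcc lines nh).Pairwise (· < ·) := by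
  by_cases hnh : nh = ""
  · simp [pvOcc, hnh]
  · rw [pvOcc_eq_filter lines nh hnh]
    exact (List.Pairwise.sublist (List.filter_sublist) (PySem.List.pairwise_lt_enumerate lines 0)).map
      _ (fun _ _ h => h)

theorem pvOcc_mem_elim (lines : List String) (nh : String) {x : Int}
    (hx : x ∈ pvOcc lines nh) :
    ∃ k : Nat, k < lines.length ∧ x = (k : Int) ∧
      (nh ≠ "" ∧ nh = pvNormWSA (pvStrippedA (lines.getD k ""))) := by
  by_cases hnh : nh = ""
  · simp [pvOcc, hnh] at hx
  · rw [pvOcc_eq_filter lines nh hnh] at hx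
    simp only [List.mem_map, List.mem_filter, PySem.List.mem_enumerate_iff] at hx
    obtain ⟨p, ⟨⟨k, hk, rfl⟩, hf⟩, rfl⟩ := hx
    simp only [beq_iff_eq] at hf
    refine ⟨k, hk, by simp, hnh, ?_⟩
    rw [List.getD_eq_getElem _ _ hk, ← pvNorm_eq]
    exact hf.symm

theorem pvOcc_mem_intro (lines : List String) (nh : String) {k : Nat}
    (hk : k < lines.length) (hnh : nh ≠ "")
    (hhit : nh = pvNormWSA (pvStrippedA (lines.getD k ""))) :
    (k : Int) ∈ pvOcc lines nh := by
  rw [pvOcc_eq_filter lines nh hnh]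
  simp only [List.mem_map, List.mem_filter, PySem.List.mem_enumerate_iff]
  refine ⟨((k : Int), lines[k]), ⟨⟨k, hk, by simp⟩, ?_⟩, rfl⟩
  simp only [beq_iff_eq, pvNorm_eq]
  rw [← List.getD_eq_getElem _ ("") hk]
  exact hhit.symm

theorem pv_getD_mono {a : List Int} (hpw : a.Pairwise (· ≤ ·)) {k m : Nat}
    (hkm : k ≤ m) (hm : m < a.length) : a.getD k 0 ≤ a.getD m 0 := by
  rcases Nat.lt_or_ge k m with h | h
  · rw [List.getD_eq_getElem _ _ (lt_trans h hm), List.getD_eq_getElem _ _ hm]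
    exact List.pairwise_iff_getElem.mp hpw k m (lt_trans h hm) hm h
  · have : k = m := le_antisymm hkm h
    subst this; rfl

theorem pvBisectB_step_lt (a : List Int) (x : Int) (lo hi : Nat) (h : lo < hi)
    (h2 : a.getD ((lo + hi) / 2) 0 < x) :
    pvBisectB a x lo hi = pvBisectB a x ((lo + hi) / 2 + 1) hi := by
  rw [pvBisectB, if_pos h]; exact if_pos h2

theorem pvBisectB_step_ge (a : List Int) (x : Int) (lo hi : Nat) (h : lo < hi)
    (h2 : ¬ a.getD ((lo + hi) / 2) 0 < x) :
    pvBisectB a x lo hi = pvBisectB a x lo ((lo + hi) / 2) := by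
  rw [pvBisectB, if_pos h]; exact if_neg h2

theorem pvBisectB_stop (a : List Int) (x : Int) (lo hi : Nat) (h : ¬ lo < hi) :
    pvBisectB a x lo hi = lo := by
  rw [pvBisectB]; exact if_neg h

theorem pvBisectB_spec (a : List Int) (x : Int) (hpw : a.Pairwise (· ≤ ·)) :
    ∀ lo hi, lo ≤ hi → hi ≤ a.length →
      (∀ k, k < lo → a.getD k 0 < x) → (∀ k, hi ≤ k → k < a.length → x ≤ a.getD k 0) →
      (∀ k, k < pvBisectB a x lo hi → a.getD k 0 < x) ∧
      (∀ k, pvBisectB a x lo hi ≤ k → k < a.length → x ≤ a.getD k 0) := by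
  have H : ∀ n lo hi, hi - lo ≤ n → lo ≤ hi → hi ≤ a.length →
      (∀ k, k < lo → a.getD k 0 < x) → (∀ k, hi ≤ k → k < a.length → x ≤ a.getD k 0) →
      (∀ k, k < pvBisectB a x lo hi → a.getD k 0 < x) ∧
      (∀ k, pvBisectB a x lo hi ≤ k → k < a.length → x ≤ a.getD k 0) := by
    intro n
    induction n with
    | zero =>
      intro lo hi hn hlo hhi h1 h2
      have heq : lo = hi := by omega
      rw [pvBisectB_stop a x lo hi (by omega)]
      subst heq
      exact ⟨h1, h2⟩
    | succ n ih =>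
      intro lo hi hn hlo hhi h1 h2
      by_cases hlt : lo < hi
      · by_cases hmid : a.getD ((lo + hi) / 2) 0 < x
        · rw [pvBisectB_step_lt a x lo hi hlt hmid]
          refine ih ((lo + hi) / 2 + 1) hi (by omega) (by omega) hhi ?_ h2
          intro k hk
          exact lt_of_le_of_lt (pv_getD_mono hpw (by omega) (by omega)) hmid
        · rw [pvBisectB_step_ge a x lo hi hlt hmid]
          refine ih lo ((lo + hi) / 2) (by omega) (by omega) (by omega) h1 ?_
          intro k hk hklen
          calc x ≤ a.getD ((lo + hi) / 2) 0 := le_of_not_gt hmid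
            _ ≤ a.getD k 0 := pv_getD_mono hpw hk hklen
      · rw [pvBisectB_stop a x lo hi hlt]
        have heq : lo = hi := by omega
        subst heq
        exact ⟨h1, h2⟩
  intro lo hi
  exact H (hi - lo) lo hi (le_refl _)

def pvHit (lines : List String) (nh : String) (k : Nat) : Prop :=
  nh ≠ "" ∧ nh = pvNormWSA (pvStrippedA (lines.getD k ""))

theorem pvInnerA_hit (lines : List String) (nh : String) (idx : Nat) (h : idx < lines.length)
    (hc : nh ≠ "" ∧ nh = pvNormWSA (pvStrippedA lines[idx])) :
    pvInnerA lines nh idx = some idx := by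
  rw [pvInnerA, dif_pos h]; exact if_pos hc

theorem pvInnerA_miss (lines : List String) (nh : String) (idx : Nat) (h : idx < lines.length)
    (hc : ¬ (nh ≠ "" ∧ nh = pvNormWSA (pvStrippedA lines[idx]))) :
    pvInnerA lines nh idx = pvInnerA lines nh (idx + 1) := by
  rw [pvInnerA, dif_pos h]; exact if_neg hc

theorem pvInnerA_stop (lines : List String) (nh : String) (idx : Nat) (h : ¬ idx < lines.length) :
    pvInnerA lines nh idx = none := by
  rw [pvInnerA]; exact dif_neg h

theorem pvInnerA_none (lines : List String) (nh : String) :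
    ∀ s, pvInnerA lines nh s = none →
      ∀ k, s ≤ k → k < lines.length → ¬ pvHit lines nh k := by
  have H : ∀ n s, lines.length - s ≤ n → pvInnerA lines nh s = none →
      ∀ k, s ≤ k → k < lines.length → ¬ pvHit lines nh k := by
    intro n
    induction n with
    | zero =>
      intro s hn _ k hks hklen
      omega
    | succ n ih =>
      intro s hn hnone k hks hklen
      by_cases h : s < lines.length
      · by_cases hc : nh ≠ "" ∧ nh = pvNormWSA (pvStrippedA lines[s])
        · rw [pvInnerA_hit lines nh s h hc] at hnone
          exact absurd hnone (by simp)
        · rw [pvInnerA_miss lines nh s h hc] at hnone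
          rcases Nat.eq_or_lt_of_le hks with rfl | hlt
          · intro ⟨hne, heq⟩
            exact hc ⟨hne, by rwa [List.getD_eq_getElem _ _ h] at heq⟩
          · exact ih (s + 1) (by omega) hnone k hlt hklen
      · omega
  intro s
  exact H (lines.length - s) s (le_refl _)

theorem pvInnerA_some (lines : List String) (nh : String) :
    ∀ s i, pvInnerA lines nh s = some i →
      s ≤ i ∧ i < lines.length ∧ pvHit lines nh i ∧
        (∀ k, s ≤ k → k < i → ¬ pvHit lines nh k) := by
  have H : ∀ n s, lines.length - s ≤ n → ∀ i, pvInnerA lines nh s = some i →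
      s ≤ i ∧ i < lines.length ∧ pvHit lines nh i ∧
        (∀ k, s ≤ k → k < i → ¬ pvHit lines nh k) := by
    intro n
    induction n with
    | zero =>
      intro s hn i hsome
      rw [pvInnerA_stop lines nh s (by omega)] at hsome
      exact absurd hsome (by simp)
    | succ n ih =>
      intro s hn i hsome
      by_cases h : s < lines.length
      · by_cases hc : nh ≠ "" ∧ nh = pvNormWSA (pvStrippedA lines[s])
        · rw [pvInnerA_hit lines nh s h hc] at hsome
          obtain rfl : s = i := by simpa using hsome
          refine ⟨le_refl _, h, ⟨hc.1, by rw [List.getD_eq_getElem _ _ h]; exact hc.2⟩, ?_⟩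
          intro k hk1 hk2; omega
        · rw [pvInnerA_miss lines nh s h hc] at hsome
          obtain ⟨h1, h2, h3, h4⟩ := ih (s + 1) (by omega) i hsome
          refine ⟨by omega, h2, h3, ?_⟩
          intro k hk1 hk2
          rcases Nat.eq_or_lt_of_le hk1 with rfl | hlt
          · intro ⟨hne, heq⟩
            exact hc ⟨hne, by rwa [List.getD_eq_getElem _ _ h] at heq⟩
          · exact h4 k hlt hk2
      · rw [pvInnerA_stop lines nh s h] at hsome
        exact absurd hsome (by simp)
  intro s
  exact H (lines.length - s) s (le_refl _)

-- the step lemmas: what one heading does on each side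
theorem pvStep_none (lines : List String) (nh : String) (s : Nat)
    (h : pvInnerA lines nh s = none) :
    ¬ pvBisectB (pvOcc lines nh) (s : Int) 0 (pvOcc lines nh).length < (pvOcc lines nh).length := by
  have hpw : (pvOcc lines nh).Pairwise (· ≤ ·) :=
    (pvOcc_pairwise lines nh).imp le_of_lt
  obtain ⟨c1, c2⟩ := pvBisectB_spec (pvOcc lines nh) (s : Int) hpw 0 (pvOcc lines nh).length
    (Nat.zero_le _) (le_refl _) (by omega) (by omega)
  intro hj
  have hmem : (pvOcc lines nh).getD (pvBisectB (pvOcc lines nh) (s : Int) 0 (pvOcc lines nh).length) 0 ∈ pvOcc lines nh := by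
    rw [List.getD_eq_getElem _ _ hj]; exact List.getElem_mem _
  obtain ⟨k, hklen, hkx, hhit⟩ := pvOcc_mem_elim lines nh hmem
  have hxk : (s : Int) ≤ (k : Int) := by
    calc (s : Int) ≤ (pvOcc lines nh).getD (pvBisectB (pvOcc lines nh) (s : Int) 0 (pvOcc lines nh).length) 0 := c2 _ (le_refl _) hj
      _ = (k : Int) := hkx
  have hsk : s ≤ k := by exact_mod_cast hxk
  exact pvInnerA_none lines nh s h k hsk hklen hhit

theorem pvStep_some (lines : List String) (nh : String) (s : Nat) (i : Nat)
    (h : pvInnerA lines nh s = some i) :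
    ∃ hj : pvBisectB (pvOcc lines nh) (s : Int) 0 (pvOcc lines nh).length < (pvOcc lines nh).length,
      (pvOcc lines nh)[pvBisectB (pvOcc lines nh) (s : Int) 0 (pvOcc lines nh).length]'hj = (i : Int) := by
  obtain ⟨hsi, hilen, hhit, hmin⟩ := pvInnerA_some lines nh s i h
  have hpw : (pvOcc lines nh).Pairwise (· ≤ ·) :=
    (pvOcc_pairwise lines nh).imp le_of_lt
  obtain ⟨c1, c2⟩ := pvBisectB_spec (pvOcc lines nh) (s : Int) hpw 0 (pvOcc lines nh).length
    (Nat.zero_le _) (le_refl _) (by omega) (by omega)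
  have hiM : (i : Int) ∈ pvOcc lines nh := pvOcc_mem_intro lines nh hilen hhit.1 hhit.2
  obtain ⟨m, hm, hmi⟩ := List.getElem_of_mem hiM
  have hmD : (pvOcc lines nh).getD m 0 = (i : Int) := by
    rw [List.getD_eq_getElem _ _ hm]; exact hmi
  have hjm : pvBisectB (pvOcc lines nh) (s : Int) 0 (pvOcc lines nh).length ≤ m := by
    by_contra hlt
    have hc := c1 m (by omega)
    rw [hmD] at hc
    have : i < s := by exact_mod_cast hc
    omega
  have hj : pvBisectB (pvOcc lines nh) (s : Int) 0 (pvOcc lines nh).length < (pvOcc lines nh).length :=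
    lt_of_le_of_lt hjm hm
  refine ⟨hj, ?_⟩
  rw [← List.getD_eq_getElem _ (0 : Int) hj]
  have hub : (pvOcc lines nh).getD (pvBisectB (pvOcc lines nh) (s : Int) 0 (pvOcc lines nh).length) 0 ≤ (i : Int) := by
    rw [← hmD]; exact pv_getD_mono hpw hjm hm
  have hmem : (pvOcc lines nh).getD (pvBisectB (pvOcc lines nh) (s : Int) 0 (pvOcc lines nh).length) 0 ∈ pvOcc lines nh := by
    rw [List.getD_eq_getElem _ _ hj]; exact List.getElem_mem _
  obtain ⟨k, hklen, hkx, hhitk⟩ := pvOcc_mem_elim lines nh hmem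
  have hsk : s ≤ k := by
    have hx : (s : Int) ≤ (k : Int) := by rw [← hkx]; exact c2 _ (le_refl _) hj
    exact_mod_cast hx
  have hik : i ≤ k := by
    by_contra hki
    exact hmin k hsk (by omega) hhitk
  have hki : k ≤ i := by
    have h2 : (k : Int) ≤ (i : Int) := by rw [← hkx]; exact hub
    exact_mod_cast h2
  rw [hkx]
  congr 1
  omega

-- the two fold step functions (definitionally the lambdas inside the ports)
def pvStepA (lines : List String) (st : List Int × Nat) (heading : String) : List Int × Nat :=
  match pvInnerA lines (pvNormWSA heading) st.2 with
  | some idx => (st.1 ++ [((idx : Int) + 1)], idx + 1)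
  | none => (st.1 ++ [(1 : Int)], st.2)

def pvStepB (lines : List String) (st : List Int × Int) (heading : String) : List Int × Int :=
  let occ := pvOcc lines (pvNormWSA heading)
  let j := pvBisectB occ st.2 0 occ.length
  if hj : j < occ.length then (st.1 ++ [occ[j] + 1], occ[j] + 1)
  else (st.1 ++ [(1 : Int)], st.2)

theorem pvFold_eq (lines : List String) :
    ∀ (hs : List String) (res : List Int) (s : Nat),
      (List.foldl (pvStepA lines) (res, s) hs).1
      = (List.foldl (pvStepB lines) (res, (s : Int)) hs).1 := by
  intro hs
  induction hs with
  | nil => intro res s; rfl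
  | cons heading rest ih =>
    intro res s
    rw [List.foldl_cons, List.foldl_cons]
    cases hA : pvInnerA lines (pvNormWSA heading) s with
    | none =>
      have hj := pvStep_none lines (pvNormWSA heading) s hA
      have hA' : pvStepA lines (res, s) heading = (res ++ [(1 : Int)], s) := by
        simp only [pvStepA, hA]
      have hB : pvStepB lines (res, (s : Int)) heading = (res ++ [(1 : Int)], (s : Int)) := by
        simp only [pvStepB]
        rw [dif_neg hj]
      rw [hA', hB]
      exact ih (res ++ [(1 : Int)]) s
    | some i =>
      obtain ⟨hj, hval⟩ := pvStep_some lines (pvNormWSA heading) s i hA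
      have hA' : pvStepA lines (res, s) heading = (res ++ [((i : Int) + 1)], i + 1) := by
        simp only [pvStepA, hA]
      have hB : pvStepB lines (res, (s : Int)) heading = (res ++ [((i : Int) + 1)], (i : Int) + 1) := by
        simp only [pvStepB]
        rw [dif_pos hj, hval]
      rw [hA', hB]
      have hcast : ((i : Int) + 1) = (((i + 1 : Nat)) : Int) := by push_cast; ring
      rw [hcast]
      exact ih (res ++ [((i : Int) + 1)]) (i + 1)

-- ===== VERDICT (by name: the statement is the Claim_ definition above) =====
theorem find_heading_lines_py_spec : Claim_equal_find_heading_lines_py := by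
  intro source_text heading_texts _
  unfold Spec_find_heading_lines_py find_heading_lines_py find_heading_lines_py_alt
  exact pvFold_eq (PySem.Str.splitlines source_text) heading_texts [] 0
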